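-- pv_equiv track=rewrite | github.com/kuziyev-sharofiddin/check_test_bot | student_bot/utils.py | check_test
-- ===== SOURCE A (Python) =====
-- def check_test(org_test_keys, test_keys):
--     results = []
--     resultString = ""
--     correct_count = ""
--     for index, org_test_key  in enumerate(org_test_keys):
--         if(len(test_keys) <= index ):
--             pass
--             # results.append(f"{index} javob kiritilmagan")
--         elif(org_test_key == test_keys[index]):
--             results.append(f" {test_keys[index]} ✅ ")
--             resultString += "1"
--             correct_count += "1"
--             # correct.append(f"{test_keys[index]}")
--
--         else:
--             results.append(f" {test_keys[index]} ❌ ")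
--             resultString += "0"
--
--     return [results, resultString, correct_count]
-- ===== SOURCE B (Python) =====
-- def check_test(org_test_keys, test_keys):
--     # divide-and-conquer over the answered pairs: split in halves, combine the
--     # three outputs by concatenation (each half's triple is independent)
--     pairs = list(zip(org_test_keys, test_keys))
--     def go(ps):
--         if not ps:
--             return [], "", ""
--         if len(ps) == 1:
--             o, t = ps[0]
--             if o == t:
--                 return [f" {t} \u2705 "], "1", "1"
--             return [f" {t} \u274c "], "0", ""
--         mid = len(ps) // 2
--         rL, sL, cL = go(ps[:mid])
--         rR, sR, cR = go(ps[mid:])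
--         return rL + rR, sL + sR, cL + cR
--     r, s, c = go(pairs)
--     return [r, s, c]
-- ===== Notes on version B (the rewrite author's own statement) =====
-- stated objective: alternative
-- what changed: Replaces A's indexed forward loop with three mutated accumulators by a divide-and-conquer: the answered pairs are split recursively in halves and each half's (results, resultString, correct_count) triple is computed independently and combined by concatenation.
import Mathlib
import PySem

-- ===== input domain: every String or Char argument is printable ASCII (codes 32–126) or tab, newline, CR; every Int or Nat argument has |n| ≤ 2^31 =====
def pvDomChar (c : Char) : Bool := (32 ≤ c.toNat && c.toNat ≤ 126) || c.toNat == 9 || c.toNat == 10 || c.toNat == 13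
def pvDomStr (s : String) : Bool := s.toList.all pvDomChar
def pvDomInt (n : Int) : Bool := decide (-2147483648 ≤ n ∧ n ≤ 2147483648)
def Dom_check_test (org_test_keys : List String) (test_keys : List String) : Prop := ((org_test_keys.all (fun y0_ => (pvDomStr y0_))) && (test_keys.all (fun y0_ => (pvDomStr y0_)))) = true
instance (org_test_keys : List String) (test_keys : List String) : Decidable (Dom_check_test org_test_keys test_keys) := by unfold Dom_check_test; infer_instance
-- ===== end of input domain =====

-- B replaces A's indexed loop with accumulators by a divide-and-conquer over the
-- answered pairs, combining each half's triple by concatenation (alternative algorithm).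

-- ===== PORT A =====
-- the indexed for-loop of A, one step per org_test_key, carrying the three accumulators and the running index
def checkTestGo (test_keys : List String) (idx : Nat) (res : List String) (rs cc : String) : List String → List String × String × String
  | [] => (res, rs, cc)
  | o :: rest =>
    if test_keys.length ≤ idx then
      checkTestGo test_keys (idx + 1) res rs cc rest
    else if o == test_keys.getD idx "" then
      checkTestGo test_keys (idx + 1) (res ++ [" " ++ test_keys.getD idx "" ++ " ✅ "]) (rs ++ "1") (cc ++ "1") rest
    else
      checkTestGo test_keys (idx + 1) (res ++ [" " ++ test_keys.getD idx "" ++ " ❌ "]) (rs ++ "0") cc rest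

def check_test (org_test_keys : List String) (test_keys : List String) : List String × String × String :=
  checkTestGo test_keys 0 [] "" "" org_test_keys

-- ===== PORT B =====
-- Source B's inner `go`: split the pair list in halves, recurse, combine by concatenation
def checkAltGo : List (String × String) → List String × String × String
  | [] => ([], "", "")
  | [(o, t)] =>
    if o == t then ([" " ++ t ++ " ✅ "], "1", "1") else ([" " ++ t ++ " ❌ "], "0", "")
  | p1 :: p2 :: rest =>
    let ps := p1 :: p2 :: rest
    let mid := ps.length / 2
    let (rL, sL, cL) := checkAltGo (ps.take mid)
    let (rR, sR, cR) := checkAltGo (ps.drop mid)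
    (rL ++ rR, sL ++ sR, cL ++ cR)
termination_by ps => ps.length
decreasing_by
  · simp only [List.length_take, List.length_cons]; omega
  · simp only [List.length_drop, List.length_cons]; omega

def check_test_alt (org_test_keys : List String) (test_keys : List String) : List String × String × String :=
  checkAltGo (org_test_keys.zip test_keys)

-- ===== PRECONDITION & SPEC =====
def Spec_check_test (org_test_keys : List String) (test_keys : List String) (out : List String × String × String) : Prop := out = check_test_alt org_test_keys test_keys
instance (org_test_keys : List String) (test_keys : List String) (out : List String × String × String) : Decidable (Spec_check_test org_test_keys test_keys out) := by unfold Spec_check_test; infer_instance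

-- ===== CLAIM (what is proved, stated in full; the proofs are below) =====
def Claim_equal_check_test : Prop := ∀ (org_test_keys : List String) (test_keys : List String), Dom_check_test org_test_keys test_keys → Spec_check_test org_test_keys test_keys (check_test org_test_keys test_keys)

-- ===== LEMMAS AND PROOFS =====

-- proof-only sequential characterisation of the triple over a pair list
def checkSpecF : List (String × String) → List String × String × String
  | [] => ([], "", "")
  | (o, t) :: rest =>
    let (res, rs, cc) := checkSpecF rest
    if o == t then ((" " ++ t ++ " ✅ ") :: res, "1" ++ rs, "1" ++ cc)
    else ((" " ++ t ++ " ❌ ") :: res, "0" ++ rs, cc)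

theorem checkSpecF_append (xs ys : List (String × String)) :
    checkSpecF (xs ++ ys) =
      ((checkSpecF xs).1 ++ (checkSpecF ys).1,
       (checkSpecF xs).2.1 ++ (checkSpecF ys).2.1,
       (checkSpecF xs).2.2 ++ (checkSpecF ys).2.2) := by
  induction xs with
  | nil => simp [checkSpecF]
  | cons p rest ih =>
    obtain ⟨o, t⟩ := p
    simp only [List.cons_append, checkSpecF, ih]
    by_cases he : o == t <;> simp [he, String.append_assoc]

theorem checkAltGo_eq_specF : ∀ ps, checkAltGo ps = checkSpecF ps := by
  intro ps
  induction ps using checkAltGo.induct with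
  | case1 => simp [checkAltGo, checkSpecF]
  | case2 o t he => simp [checkAltGo, checkSpecF, he]
  | case3 o t he => simp [checkAltGo, checkSpecF, he]
  | case4 p1 p2 rest =>
    rename_i rL sL cL hL rR sR cR hR ihL ihR
    rw [checkAltGo]
    conv_rhs => rw [← List.take_append_drop ((p1 :: p2 :: rest).length / 2) (p1 :: p2 :: rest)]
    rw [checkSpecF_append, ← ihL, ← ihR, hL, hR]

theorem checkTestGo_eq (org : List String) : ∀ (tk : List String) (idx : Nat) (res : List String) (rs cc : String),
    checkTestGo tk idx res rs cc org =
      (res ++ (checkSpecF (org.zip (tk.drop idx))).1,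
       rs ++ (checkSpecF (org.zip (tk.drop idx))).2.1,
       cc ++ (checkSpecF (org.zip (tk.drop idx))).2.2) := by
  induction org with
  | nil =>
    intro tk idx res rs cc
    simp [checkTestGo, checkSpecF]
  | cons o rest ih =>
    intro tk idx res rs cc
    by_cases h : tk.length ≤ idx
    · have hdrop : tk.drop idx = [] := List.drop_eq_nil_of_le h
      have hdrop' : tk.drop (idx + 1) = [] := List.drop_eq_nil_of_le (by omega)
      simp only [checkTestGo, if_pos h, ih, hdrop, hdrop']
      simp [checkSpecF]
    · have hlt : idx < tk.length := by omega
      have hdrop : tk.drop idx = tk[idx] :: tk.drop (idx + 1) :=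
        List.drop_eq_getElem_cons hlt
      have hgetD : tk.getD idx "" = tk[idx] := by
        simp [List.getD, List.getElem?_eq_getElem hlt]
      by_cases he : o == tk[idx]
      · simp only [checkTestGo, if_neg h, hgetD, if_pos he, ih]
        rw [hdrop]
        simp only [List.zip_cons_cons, checkSpecF, he, if_pos]
        simp [String.append_assoc]
      · simp only [checkTestGo, if_neg h, hgetD, if_neg he, ih]
        rw [hdrop]
        simp only [List.zip_cons_cons, checkSpecF, he, if_neg, Bool.false_eq_true, not_false_iff]
        simp [String.append_assoc]

-- ===== VERDICT (by name: the statement is the Claim_ definition above) =====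
theorem check_test_spec : Claim_equal_check_test := by
  intro org tk _
  unfold Spec_check_test check_test check_test_alt
  rw [checkTestGo_eq, checkAltGo_eq_specF]
  simp
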